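-- pv_equiv track=rewrite | github.com/Revanththetalogics/aireume | app/backend/services/skill_proficiency_service.py | estimate_skill_proficiency
-- ===== SOURCE A (Python) =====
-- PROFICIENCY_CUE_MAP: dict[str, list[str]] = {
--     "expert": [
--         "expert in", "deep knowledge of", "mastery of",
--         "extensive experience with", "8+ years", "10+ years",
--         "expert-level", "deep expertise",
--     ],
--     "advanced": [
--         "proficient in", "solid experience", "strong knowledge",
--         "strong background", "5+ years", "6+ years", "7+ years",
--         "proven track record with", "advanced knowledge",
--         "hands-on experience",
--     ],
--     "intermediate": [
--         "working knowledge of", "experience with", "good understanding",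
--         "2+ years", "3+ years", "4+ years", "comfortable with",
--     ],
--     "basic": [
--         "basic understanding of", "exposure to", "awareness of",
--         "familiarity with", "knowledge of", "1+ year",
--         "some experience",
--     ],
-- }
--
-- _PROFICIENCY_RANK = {"basic": 0, "intermediate": 1, "advanced": 2, "expert": 3}
--
-- _SENIORITY_DEFAULT_PROFICIENCY: dict[str, str] = {
--     "junior": "basic",
--     "mid": "intermediate",
--     "senior": "advanced",
--     "lead": "expert",
--     "principal": "expert",
-- }
--
-- def estimate_skill_proficiency(
--     skill: str,
--     seniority: str,
--     jd_text: str,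
--     is_nice_to_have: bool = False,
-- ) -> str:
--     """Estimate the expected proficiency level for a skill based on
--     linguistic cues in the JD text and the role's seniority.
--
--     Priority order:
--       1. Cue-based detection (±150 chars around skill mention)
--       2. Seniority-based default
--       3. Nice-to-have cap (one level below seniority default)
--
--     Returns one of: "basic", "intermediate", "advanced", "expert".
--     """
--     jd_lower = jd_text.lower()
--     skill_lower = skill.lower()
--     pos = jd_lower.find(skill_lower)
--
--     # --- Step 1: Try cue-based detection around the skill mention ---
--     if pos >= 0:
--         ctx_start = max(0, pos - 150)
--         ctx_end = min(len(jd_text), pos + len(skill_lower) + 150)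
--         context = jd_lower[ctx_start:ctx_end]
--
--         for level in ("expert", "advanced", "intermediate", "basic"):
--             if any(cue in context for cue in PROFICIENCY_CUE_MAP[level]):
--                 proficiency = level
--                 break
--         else:
--             proficiency = None
--     else:
--         proficiency = None
--
--     # --- Step 2: Fall back to seniority-based default ---
--     if proficiency is None:
--         proficiency = _SENIORITY_DEFAULT_PROFICIENCY.get(seniority.lower(), "intermediate")
--
--     # --- Step 3: Nice-to-have cap — one level below seniority default ---
--     if is_nice_to_have:
--         seniority_default = _SENIORITY_DEFAULT_PROFICIENCY.get(
--             seniority.lower(), "intermediate"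
--         )
--         cap_rank = max(_PROFICIENCY_RANK[seniority_default] - 1, 0)
--         if _PROFICIENCY_RANK[proficiency] > cap_rank:
--             proficiency = [k for k, v in _PROFICIENCY_RANK.items() if v == cap_rank][0]
--
--     return proficiency
-- ===== SOURCE B (Python) =====
-- _EXPERT_CUES = [
--     "expert in", "deep knowledge of", "mastery of",
--     "extensive experience with", "8+ years", "10+ years",
--     "expert-level", "deep expertise",
-- ]
-- _ADVANCED_CUES = [
--     "proficient in", "solid experience", "strong knowledge",
--     "strong background", "5+ years", "6+ years", "7+ years",
--     "proven track record with", "advanced knowledge",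
--     "hands-on experience",
-- ]
-- _INTERMEDIATE_CUES = [
--     "working knowledge of", "experience with", "good understanding",
--     "2+ years", "3+ years", "4+ years", "comfortable with",
-- ]
-- _BASIC_CUES = [
--     "basic understanding of", "exposure to", "awareness of",
--     "familiarity with", "knowledge of", "1+ year",
--     "some experience",
-- ]
--
-- # flat cue -> rank pairs (basic 0, intermediate 1, advanced 2, expert 3)
-- _CUE_RANKS = (
--     [(cue, 3) for cue in _EXPERT_CUES]
--     + [(cue, 2) for cue in _ADVANCED_CUES]
--     + [(cue, 1) for cue in _INTERMEDIATE_CUES]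
--     + [(cue, 0) for cue in _BASIC_CUES]
-- )
--
-- _SENIORITY_RANK = {"junior": 0, "mid": 1, "senior": 2, "lead": 3, "principal": 3}
--
-- _LEVEL_NAMES = ["basic", "intermediate", "advanced", "expert"]
--
--
-- def estimate_skill_proficiency(skill, seniority, jd_text, is_nice_to_have=False):
--     """Scanning variant: never materialises the context window and never calls
--     substring search per cue.  A cursor slides over the window's offsets in the
--     lowered JD and at each offset naively multi-pattern-matches which cue
--     phrases begin there (startswith + fit check against the window end),
--     accumulating the maximum rank seen; seniority default and the nice-to-have
--     cap are integer min/max arithmetic with one final name lookup."""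
--     jd_lower = jd_text.lower()
--     skill_lower = skill.lower()
--     pos = jd_lower.find(skill_lower)
--
--     best = -1
--     if pos >= 0:
--         start = max(0, pos - 150)
--         end = min(len(jd_text), pos + len(skill_lower) + 150)
--         for i in range(start, end):
--             for cue, r in _CUE_RANKS:
--                 if r > best and i + len(cue) <= end and jd_lower.startswith(cue, i):
--                     best = r
--
--     default_rank = _SENIORITY_RANK.get(seniority.lower(), 1)
--     if best < 0:
--         best = default_rank
--     if is_nice_to_have:
--         best = min(best, max(default_rank - 1, 0))
--     return _LEVEL_NAMES[best]
-- ===== Notes on version B (the rewrite author's own statement) =====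
-- stated objective: alternative
-- what changed: Step 1's per-cue substring searches over an extracted +-150-char context slice are replaced by a naive multi-pattern scan: no context string is built at all; a cursor walks the window's offsets in the lowered JD and at each offset tests which cue phrases begin there (startswith with a fit check against the window end), accumulating the maximum rank, and Steps 2-3 become integer rank min/max arithmetic with one final name lookup instead of string-level dict lookups and rank-dict filtering.
import Mathlib
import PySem

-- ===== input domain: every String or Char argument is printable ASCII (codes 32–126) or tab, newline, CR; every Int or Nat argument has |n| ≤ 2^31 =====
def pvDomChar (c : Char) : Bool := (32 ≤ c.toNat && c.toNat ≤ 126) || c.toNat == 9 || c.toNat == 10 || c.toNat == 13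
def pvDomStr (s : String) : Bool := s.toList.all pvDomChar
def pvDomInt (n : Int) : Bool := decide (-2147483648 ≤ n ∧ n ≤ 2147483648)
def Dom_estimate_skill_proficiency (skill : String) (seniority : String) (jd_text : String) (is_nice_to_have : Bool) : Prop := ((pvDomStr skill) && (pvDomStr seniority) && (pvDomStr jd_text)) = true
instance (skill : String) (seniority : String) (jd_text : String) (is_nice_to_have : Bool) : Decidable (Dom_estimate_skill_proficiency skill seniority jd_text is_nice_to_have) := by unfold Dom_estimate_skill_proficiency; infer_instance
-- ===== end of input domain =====

-- B replaces Step 1's per-cue substring searches over an extracted ±150-char context slice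
-- by a naive multi-pattern scan over the window offsets of the lowered JD (no context
-- string built), and does Steps 2-3 in integer ranks (objective: alternative, same cost).


-- ===== PORT A =====
def pvProficiencyCueMap : PySem.Dict String (List String) := PySem.Dict.ofList [
  ("expert", ["expert in", "deep knowledge of", "mastery of",
    "extensive experience with", "8+ years", "10+ years",
    "expert-level", "deep expertise"]),
  ("advanced", ["proficient in", "solid experience", "strong knowledge",
    "strong background", "5+ years", "6+ years", "7+ years",
    "proven track record with", "advanced knowledge",
    "hands-on experience"]),
  ("intermediate", ["working knowledge of", "experience with", "good understanding",
    "2+ years", "3+ years", "4+ years", "comfortable with"]),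
  ("basic", ["basic understanding of", "exposure to", "awareness of",
    "familiarity with", "knowledge of", "1+ year",
    "some experience"])]

def pvProficiencyRank : PySem.Dict String Int :=
  PySem.Dict.ofList [("basic", 0), ("intermediate", 1), ("advanced", 2), ("expert", 3)]

def pvSeniorityDefault : PySem.Dict String String :=
  PySem.Dict.ofList [("junior", "basic"), ("mid", "intermediate"),
    ("senior", "advanced"), ("lead", "expert"), ("principal", "expert")]

-- the for-level loop with break (for … else: proficiency = None)
def pvFindLevel (context : String) : List String → Option String
  | [] => none
  | lvl :: rest =>
    if (pvProficiencyCueMap.getD lvl []).any (fun cue => PySem.Str.isIn cue context) then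
      some lvl
    else pvFindLevel context rest

-- Steps 2 and 3 of A (seniority default, nice-to-have cap), factored as a helper
def pvStep23A (seniority : String) (is_nice_to_have : Bool) (proficiency : Option String) : String :=
  let proficiency₂ :=
    match proficiency with
    | none => pvSeniorityDefault.getD (PySem.Str.lower seniority) "intermediate"
    | some p => p
  if is_nice_to_have then
    let seniority_default := pvSeniorityDefault.getD (PySem.Str.lower seniority) "intermediate"
    -- _PROFICIENCY_RANK[…]: the keys are always present, so getD 0 is exact here
    let cap_rank := max (pvProficiencyRank.getD seniority_default 0 - 1) 0
    if pvProficiencyRank.getD proficiency₂ 0 > cap_rank then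
      (((pvProficiencyRank.items.filter (fun p => p.2 == cap_rank)).map Prod.fst).headD "")
      -- [k for k,v in … if v == cap_rank][0]: nonempty since cap_rank ∈ {0,1,2}, so [0] never raises
    else proficiency₂
  else proficiency₂

def estimate_skill_proficiency (skill : String) (seniority : String) (jd_text : String) (is_nice_to_have : Bool) : String :=
  let jd_lower := PySem.Str.lower jd_text
  let skill_lower := PySem.Str.lower skill
  let pos := PySem.Str.find jd_lower skill_lower
  let proficiency : Option String :=
    if pos ≥ 0 then
      let ctx_start := max 0 (pos - 150)
      let ctx_end := min (PySem.Str.len jd_text) (pos + PySem.Str.len skill_lower + 150)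
      let context := PySem.Str.slice jd_lower (some ctx_start) (some ctx_end)
      pvFindLevel context ["expert", "advanced", "intermediate", "basic"]
    else none
  pvStep23A seniority is_nice_to_have proficiency

-- ===== PORT B =====
def pvExpertCues : List String := ["expert in", "deep knowledge of", "mastery of",
  "extensive experience with", "8+ years", "10+ years", "expert-level", "deep expertise"]
def pvAdvancedCues : List String := ["proficient in", "solid experience", "strong knowledge",
  "strong background", "5+ years", "6+ years", "7+ years",
  "proven track record with", "advanced knowledge", "hands-on experience"]
def pvIntermediateCues : List String := ["working knowledge of", "experience with",
  "good understanding", "2+ years", "3+ years", "4+ years", "comfortable with"]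
def pvBasicCues : List String := ["basic understanding of", "exposure to", "awareness of",
  "familiarity with", "knowledge of", "1+ year", "some experience"]

def pvCueRanks : List (String × Int) :=
  pvExpertCues.map (fun cue => (cue, 3)) ++ pvAdvancedCues.map (fun cue => (cue, 2))
  ++ pvIntermediateCues.map (fun cue => (cue, 1)) ++ pvBasicCues.map (fun cue => (cue, 0))

def pvSeniorityRank : PySem.Dict String Int :=
  PySem.Dict.ofList [("junior", 0), ("mid", 1), ("senior", 2), ("lead", 3), ("principal", 3)]

def pvLevelNames : List String := ["basic", "intermediate", "advanced", "expert"]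

-- Python's s.startswith(p, i): exact for 0 ≤ i (the only use: i ≥ start ≥ 0)
def pvStartswithFrom (s : String) (p : String) (i : Int) : Bool :=
  PySem.Chars.startswith (s.toList.drop i.toNat) p.toList

-- Steps 2 and 3 of B (default rank, cap as min/max, final name lookup), factored as a helper
def pvStep23B (seniority : String) (is_nice_to_have : Bool) (rank : Int) : String :=
  let default_rank := pvSeniorityRank.getD (PySem.Str.lower seniority) 1
  let rank := if rank < 0 then default_rank else rank
  let rank := if is_nice_to_have then min rank (max (default_rank - 1) 0) else rank
  ((PySem.List.pyGet? pvLevelNames rank).getD "")  -- rank is always in 0..3, so [rank] never raises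

def estimate_skill_proficiency_alt (skill : String) (seniority : String) (jd_text : String) (is_nice_to_have : Bool) : String :=
  let jd_lower := PySem.Str.lower jd_text
  let skill_lower := PySem.Str.lower skill
  let pos := PySem.Str.find jd_lower skill_lower
  let best : Int :=
    if pos ≥ 0 then
      let start := max 0 (pos - 150)
      let stop := min (PySem.Str.len jd_text) (pos + PySem.Str.len skill_lower + 150)
      (PySem.List.pyRange start stop 1).foldl
        (fun best i =>
          pvCueRanks.foldl
            (fun best cr =>
              if cr.2 > best ∧ i + PySem.Str.len cr.1 ≤ stop ∧ pvStartswithFrom jd_lower cr.1 i then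
                cr.2
              else best)
            best)
        (-1)
    else (-1)
  pvStep23B seniority is_nice_to_have best

-- ===== PRECONDITION & SPEC =====
def Spec_estimate_skill_proficiency (skill : String) (seniority : String) (jd_text : String) (is_nice_to_have : Bool) (out : String) : Prop := out = estimate_skill_proficiency_alt skill seniority jd_text is_nice_to_have
instance (skill : String) (seniority : String) (jd_text : String) (is_nice_to_have : Bool) (out : String) : Decidable (Spec_estimate_skill_proficiency skill seniority jd_text is_nice_to_have out) := by unfold Spec_estimate_skill_proficiency; infer_instance

-- ===== CLAIM (what is proved, stated in full; the proofs are below) =====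
def Claim_equal_estimate_skill_proficiency : Prop := ∀ (skill : String) (seniority : String) (jd_text : String) (is_nice_to_have : Bool), Dom_estimate_skill_proficiency skill seniority jd_text is_nice_to_have → Spec_estimate_skill_proficiency skill seniority jd_text is_nice_to_have (estimate_skill_proficiency skill seniority jd_text is_nice_to_have)

-- ===== LEMMAS AND PROOFS =====

-- the accumulator never decreases under a max-accumulation fold
theorem pvMaxfoldGe {α : Type} (p : α → Prop) [DecidablePred p] (f : α → Int) :
    ∀ (l : List α) (a : Int),
      a ≤ l.foldl (fun (a : Int) (x : α) => if p x then max a (f x) else a) a := by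
  intro l
  induction l with
  | nil => intro a; simp
  | cons x l ih =>
    intro a
    simp only [List.foldl_cons]
    have h1 : a ≤ if p x then max a (f x) else a := by split_ifs <;> omega
    exact le_trans h1 (ih _)

-- max commutes out of a max-accumulation fold
theorem pvMaxfoldMax {α : Type} (p : α → Prop) [DecidablePred p] (f : α → Int) :
    ∀ (l : List α) (a b : Int),
      l.foldl (fun (a : Int) (x : α) => if p x then max a (f x) else a) (max a b)
        = max a (l.foldl (fun (a : Int) (x : α) => if p x then max a (f x) else a) b) := by
  intro l
  induction l with
  | nil => intro a b; simp
  | cons x l ih =>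
    intro a b
    simp only [List.foldl_cons]
    by_cases h : p x
    · simp only [h, if_true]
      rw [max_assoc, ih]
    · simp only [h, if_false, ih]

-- two max-accumulation passes over the same list merge into one with the union predicate
theorem pvMaxfoldUnion {α : Type} (p q : α → Prop) [DecidablePred p] [DecidablePred q] (f : α → Int) :
    ∀ (l : List α) (a : Int),
      l.foldl (fun (a : Int) (x : α) => if q x then max a (f x) else a)
        (l.foldl (fun (a : Int) (x : α) => if p x then max a (f x) else a) a)
        = l.foldl (fun (a : Int) (x : α) => if p x ∨ q x then max a (f x) else a) a := by
  intro l
  induction l with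
  | nil => intro a; simp
  | cons x l ih =>
    intro a
    simp only [List.foldl_cons]
    by_cases hp : p x <;> by_cases hq : q x <;>
      simp only [hp, hq, true_or, or_true, or_self, if_true, if_false, false_or, or_false]
    · -- both fire: the second f x is absorbed
      rw [max_comm _ (f x), pvMaxfoldMax, ih]
      have h1 : max a (f x) ≤ l.foldl (fun (a : Int) (x : α) => if p x ∨ q x then max a (f x) else a) (max a (f x)) := pvMaxfoldGe _ _ _ _
      omega
    · exact ih _
    · rw [max_comm _ (f x), pvMaxfoldMax, ih, max_comm a (f x), pvMaxfoldMax]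
    · exact ih _

-- interchange: an outer fold of inner max-accumulation passes is one pass with an ∃-condition
theorem pvInterchange {ι α : Type} (q : ι → α → Prop) [∀ i x, Decidable (q i x)] (f : α → Int) :
    ∀ (I : List ι) (cs : List α) (a : Int),
      I.foldl (fun (a : Int) (i : ι) =>
          cs.foldl (fun (a : Int) (x : α) => if q i x then max a (f x) else a) a) a
        = cs.foldl (fun (a : Int) (x : α) => if ∃ i ∈ I, q i x then max a (f x) else a) a := by
  intro I
  induction I with
  | nil =>
    intro cs a
    simp
  | cons i I ih =>
    intro cs a
    simp only [List.foldl_cons]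
    rw [ih, pvMaxfoldUnion (q i) (fun x => ∃ j ∈ I, q j x) f]
    have : (fun (a : Int) (x : α) => if q i x ∨ ∃ j ∈ I, q j x then max a (f x) else a)
        = (fun (a : Int) (x : α) => if ∃ j ∈ i :: I, q j x then max a (f x) else a) := by
      funext a x
      exact (if_congr (by simp [List.exists_mem_cons_iff]) rfl rfl)
    rw [this]

-- a nonempty pattern occurs in the window slice iff it starts at some in-window offset and fits
theorem pvWindow (jdl cue : List Char) (hcue : cue ≠ [])
    (s e : Int) (hs : 0 ≤ s) (he : e ≤ (jdl.length : Int)) :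
    (∃ i ∈ PySem.List.pyRange s e 1,
        i + (cue.length : Int) ≤ e ∧ PySem.Chars.startswith (jdl.drop i.toNat) cue = true)
      ↔ PySem.Chars.isIn cue ((jdl.drop s.toNat).take (e.toNat - s.toNat)) = true := by
  constructor
  · rintro ⟨i, hi, hfit, hsw⟩
    rw [PySem.List.mem_pyRange_one] at hi
    rw [PySem.Chars.startswith_iff] at hsw
    rw [← PySem.Chars.exists_prefix_drop_iff_isIn]
    refine ⟨i.toNat - s.toNat, ?_⟩
    rw [List.drop_take, List.drop_drop]
    have hlen := hsw.length_le
    rw [List.length_drop] at hlen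
    have h1 : s.toNat + (i.toNat - s.toNat) = i.toNat := by omega
    rw [h1]
    rw [List.prefix_take_iff]
    exact ⟨hsw, by omega⟩
  · intro hin
    rw [← PySem.Chars.exists_prefix_drop_iff_isIn] at hin
    obtain ⟨j, hj⟩ := hin
    rw [List.drop_take, List.drop_drop] at hj
    rw [List.prefix_take_iff] at hj
    obtain ⟨hpre, hlen⟩ := hj
    have hc1 : 1 ≤ cue.length := by
      cases cue with
      | nil => exact absurd rfl hcue
      | cons _ _ => simp
    refine ⟨(s.toNat + j : Nat), ?_, ?_, ?_⟩
    · rw [PySem.List.mem_pyRange_one]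
      constructor <;> push_cast <;> omega
    · push_cast; omega
    · rw [PySem.Chars.startswith_iff]
      have : ((s.toNat + j : Nat) : Int).toNat = s.toNat + j := by omega
      rw [this]
      exact hpre

-- every cue phrase is nonempty
theorem pvCuesNonempty : ∀ cr ∈ pvCueRanks, cr.1.toList ≠ [] := by decide

-- a guarded overwrite step equals a max-accumulation step (pointwise)
theorem pvGuardMaxPt (a v : Int) (P : Prop) [Decidable P] :
    (if v > a ∧ P then v else a) = (if P then max a v else a) := by
  by_cases hP : P
  · simp only [hP, and_true, if_true]
    split_ifs <;> omega
  · simp only [hP, and_false, if_false]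

-- B's double scan over window offsets equals A-style per-cue membership in the slice
theorem pvScanEqFlat (jd_lower : String) (s e : Int) (hs : 0 ≤ s) (hse : s ≤ e)
    (he : e ≤ (jd_lower.toList.length : Int)) :
    (PySem.List.pyRange s e 1).foldl
        (fun best i =>
          pvCueRanks.foldl
            (fun best cr =>
              if cr.2 > best ∧ i + PySem.Str.len cr.1 ≤ e ∧ pvStartswithFrom jd_lower cr.1 i then
                cr.2
              else best)
            best)
        (-1)
      = pvCueRanks.foldl
          (fun acc cr =>
            if cr.2 > acc ∧ PySem.Str.isIn cr.1 (PySem.Str.slice jd_lower (some s) (some e)) then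
              cr.2
            else acc)
          (-1) := by
  have he0 : 0 ≤ e := le_trans hs hse
  calc (PySem.List.pyRange s e 1).foldl
        (fun best i =>
          pvCueRanks.foldl
            (fun best cr =>
              if cr.2 > best ∧ i + PySem.Str.len cr.1 ≤ e ∧ pvStartswithFrom jd_lower cr.1 i then
                cr.2
              else best)
            best)
        (-1)
      = (PySem.List.pyRange s e 1).foldl
        (fun best i =>
          pvCueRanks.foldl
            (fun (best : Int) (cr : String × Int) =>
              if i + PySem.Str.len cr.1 ≤ e ∧ pvStartswithFrom jd_lower cr.1 i = true then
                max best cr.2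
              else best)
            best)
        (-1) := by
        apply PySem.List.foldl_congr_mem
        intro acc i _
        apply PySem.List.foldl_congr_mem
        intro acc' cr _
        exact pvGuardMaxPt acc' cr.2 _
    _ = pvCueRanks.foldl
        (fun (acc : Int) (cr : String × Int) =>
          if (∃ i ∈ PySem.List.pyRange s e 1,
              i + PySem.Str.len cr.1 ≤ e ∧ pvStartswithFrom jd_lower cr.1 i = true) then
            max acc cr.2
          else acc)
        (-1) :=
        pvInterchange
          (fun (i : Int) (cr : String × Int) =>
            i + PySem.Str.len cr.1 ≤ e ∧ pvStartswithFrom jd_lower cr.1 i = true)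
          (fun cr => cr.2) _ _ _
    _ = pvCueRanks.foldl
          (fun acc cr =>
            if cr.2 > acc ∧ PySem.Str.isIn cr.1 (PySem.Str.slice jd_lower (some s) (some e)) then
              cr.2
            else acc)
          (-1) := by
        apply PySem.List.foldl_congr_mem
        intro acc cr hmem
        have hne := pvCuesNonempty cr hmem
        have hcond : (∃ i ∈ PySem.List.pyRange s e 1,
              i + PySem.Str.len cr.1 ≤ e ∧ pvStartswithFrom jd_lower cr.1 i = true)
            ↔ PySem.Str.isIn cr.1 (PySem.Str.slice jd_lower (some s) (some e)) = true := by
          rw [PySem.Str.isIn_eq, PySem.Str.toList_slice, PySem.Chars.slice_eq_listSlice,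
              PySem.List.slice_toNat jd_lower.toList hs he0]
          simp only [pvStartswithFrom, PySem.Str.len_eq, PySem.Chars.len]
          exact pvWindow jd_lower.toList cr.1.toList hne s e hs he
        simp only [hcond]
        exact (pvGuardMaxPt acc cr.2 _).symm

-- the two final steps agree, given matched-up step-1 results
theorem pvTailEq (seniority : String) (nice : Bool) (r : Int) (prof : Option String)
    (h : (r = -1 ∧ prof = none) ∨ (r = 0 ∧ prof = some "basic") ∨
         (r = 1 ∧ prof = some "intermediate") ∨ (r = 2 ∧ prof = some "advanced") ∨
         (r = 3 ∧ prof = some "expert")) :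
    pvStep23A seniority nice prof = pvStep23B seniority nice r := by
  unfold pvStep23A pvStep23B
  have hmk : pvSeniorityRank = PySem.Dict.mk [("junior", 0), ("mid", 1), ("senior", 2), ("lead", 3), ("principal", 3)] := by rfl
  have hmk2 : pvSeniorityDefault = PySem.Dict.mk [("junior", "basic"), ("mid", "intermediate"), ("senior", "advanced"), ("lead", "expert"), ("principal", "expert")] := by rfl
  have h0 : ({ items := [] } : PySem.Dict String Int).get? (PySem.Str.lower seniority) = none := rfl
  have h0' : ({ items := [] } : PySem.Dict String String).get? (PySem.Str.lower seniority) = none := rfl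
  have hd : pvSeniorityRank.getD (PySem.Str.lower seniority) 1 = 0 ∨
      pvSeniorityRank.getD (PySem.Str.lower seniority) 1 = 1 ∨
      pvSeniorityRank.getD (PySem.Str.lower seniority) 1 = 2 ∨
      pvSeniorityRank.getD (PySem.Str.lower seniority) 1 = 3 := by
    rw [hmk, PySem.Dict.getD_eq_get?_getD]
    repeat rw [PySem.Dict.get?_mk_cons]
    rw [h0]; split_ifs <;> simp
  have hs : pvSeniorityDefault.getD (PySem.Str.lower seniority) "intermediate" =
      (PySem.List.pyGet? pvLevelNames (pvSeniorityRank.getD (PySem.Str.lower seniority) 1)).getD "" := by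
    rw [hmk, hmk2, PySem.Dict.getD_eq_get?_getD, PySem.Dict.getD_eq_get?_getD]
    repeat rw [PySem.Dict.get?_mk_cons]
    rw [h0, h0']; split_ifs <;> rfl
  rw [hs]
  generalize pvSeniorityRank.getD (PySem.Str.lower seniority) 1 = d at hd ⊢
  rcases hd with hd | hd | hd | hd <;> subst hd <;>
    rcases h with ⟨hr, hp⟩ | ⟨hr, hp⟩ | ⟨hr, hp⟩ | ⟨hr, hp⟩ | ⟨hr, hp⟩ <;> subst hr <;> subst hp <;>
    cases nice <;> decide

-- B's max-accumulating pass over one constant-rank group, as a function of "any cue matches"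
theorem pvGroupFold (context : String) (r : Int) (cues : List String) (acc : Int) :
    (cues.map (fun cue => (cue, r))).foldl
        (fun acc cr => if cr.2 > acc ∧ PySem.Str.isIn cr.1 context then cr.2 else acc) acc
      = if r > acc ∧ cues.any (fun cue => PySem.Str.isIn cue context) then r else acc := by
  induction cues generalizing acc with
  | nil => simp
  | cons c cs ih =>
    simp only [List.map_cons, List.foldl_cons, List.any_cons, ih]
    by_cases hm : PySem.Str.isIn c context = true <;> by_cases hr : r > acc <;>
      simp_all <;> split_ifs <;> omega

-- A's step-1 level and the flat guarded fold's rank over the same context, matched up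
theorem pvStep1 (context : String) :
    (pvCueRanks.foldl
        (fun acc cr => if cr.2 > acc ∧ PySem.Str.isIn cr.1 context then cr.2 else acc) (-1) = -1 ∧
      pvFindLevel context ["expert", "advanced", "intermediate", "basic"] = none) ∨
    (pvCueRanks.foldl
        (fun acc cr => if cr.2 > acc ∧ PySem.Str.isIn cr.1 context then cr.2 else acc) (-1) = 0 ∧
      pvFindLevel context ["expert", "advanced", "intermediate", "basic"] = some "basic") ∨
    (pvCueRanks.foldl
        (fun acc cr => if cr.2 > acc ∧ PySem.Str.isIn cr.1 context then cr.2 else acc) (-1) = 1 ∧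
      pvFindLevel context ["expert", "advanced", "intermediate", "basic"] = some "intermediate") ∨
    (pvCueRanks.foldl
        (fun acc cr => if cr.2 > acc ∧ PySem.Str.isIn cr.1 context then cr.2 else acc) (-1) = 2 ∧
      pvFindLevel context ["expert", "advanced", "intermediate", "basic"] = some "advanced") ∨
    (pvCueRanks.foldl
        (fun acc cr => if cr.2 > acc ∧ PySem.Str.isIn cr.1 context then cr.2 else acc) (-1) = 3 ∧
      pvFindLevel context ["expert", "advanced", "intermediate", "basic"] = some "expert") := by
  have hE : pvProficiencyCueMap.getD "expert" [] = pvExpertCues := rfl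
  have hAd : pvProficiencyCueMap.getD "advanced" [] = pvAdvancedCues := rfl
  have hI : pvProficiencyCueMap.getD "intermediate" [] = pvIntermediateCues := rfl
  have hBa : pvProficiencyCueMap.getD "basic" [] = pvBasicCues := rfl
  have hA : pvFindLevel context ["expert", "advanced", "intermediate", "basic"] =
      if pvExpertCues.any (fun cue => PySem.Str.isIn cue context) then some "expert"
      else if pvAdvancedCues.any (fun cue => PySem.Str.isIn cue context) then some "advanced"
      else if pvIntermediateCues.any (fun cue => PySem.Str.isIn cue context) then some "intermediate"
      else if pvBasicCues.any (fun cue => PySem.Str.isIn cue context) then some "basic"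
      else none := by
    simp only [pvFindLevel, hE, hAd, hI, hBa]
  have hB : pvCueRanks.foldl
      (fun acc cr => if cr.2 > acc ∧ PySem.Str.isIn cr.1 context then cr.2 else acc) (-1) =
      if (3:Int) > -1 ∧ pvExpertCues.any (fun cue => PySem.Str.isIn cue context) then
        if (2:Int) > 3 ∧ pvAdvancedCues.any (fun cue => PySem.Str.isIn cue context) then 2
        else if (1:Int) > 3 ∧ pvIntermediateCues.any (fun cue => PySem.Str.isIn cue context) then 1
        else if (0:Int) > 3 ∧ pvBasicCues.any (fun cue => PySem.Str.isIn cue context) then 0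
        else 3
      else
        if (2:Int) > -1 ∧ pvAdvancedCues.any (fun cue => PySem.Str.isIn cue context) then
          if (1:Int) > 2 ∧ pvIntermediateCues.any (fun cue => PySem.Str.isIn cue context) then 1
          else if (0:Int) > 2 ∧ pvBasicCues.any (fun cue => PySem.Str.isIn cue context) then 0
          else 2
        else
          if (1:Int) > -1 ∧ pvIntermediateCues.any (fun cue => PySem.Str.isIn cue context) then
            if (0:Int) > 1 ∧ pvBasicCues.any (fun cue => PySem.Str.isIn cue context) then 0
            else 1
          else
            if (0:Int) > -1 ∧ pvBasicCues.any (fun cue => PySem.Str.isIn cue context) then 0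
            else -1 := by
    rw [pvCueRanks]
    rw [List.foldl_append, List.foldl_append, List.foldl_append]
    rw [pvGroupFold, pvGroupFold, pvGroupFold, pvGroupFold]
    split_ifs <;> omega
  rw [hA, hB]
  by_cases he : pvExpertCues.any (fun cue => PySem.Str.isIn cue context) = true <;>
    by_cases ha : pvAdvancedCues.any (fun cue => PySem.Str.isIn cue context) = true <;>
    by_cases hi : pvIntermediateCues.any (fun cue => PySem.Str.isIn cue context) = true <;>
    by_cases hb : pvBasicCues.any (fun cue => PySem.Str.isIn cue context) = true <;>
    (simp only [he, ha, hi, hb]; norm_num)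

-- the lowered JD has the same length as the JD (lower is per-character)
theorem pvLowerLen (s : String) : ((PySem.Str.lower s).toList.length : Int) = PySem.Str.len s := by
  simp [PySem.Str.toList_lower, PySem.Chars.lower, PySem.Chars.len]

-- ===== VERDICT (by name: the statement is the Claim_ definition above) =====
theorem estimate_skill_proficiency_spec : Claim_equal_estimate_skill_proficiency := by
  intro skill seniority jd_text nice _
  unfold Spec_estimate_skill_proficiency
  simp only [estimate_skill_proficiency, estimate_skill_proficiency_alt]
  by_cases hpos : PySem.Str.find (PySem.Str.lower jd_text) (PySem.Str.lower skill) ≥ 0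
  · rw [if_pos hpos, if_pos hpos]
    set pos := PySem.Str.find (PySem.Str.lower jd_text) (PySem.Str.lower skill) with hposdef
    have hlen : ((PySem.Str.lower jd_text).toList.length : Int) = PySem.Str.len jd_text :=
      pvLowerLen jd_text
    have hple : pos ≤ ((PySem.Str.lower jd_text).toList.length : Int) := by
      rw [hposdef, PySem.Str.find_eq]
      exact PySem.Chars.find_le_length _ _
    have hskl : (0:Int) ≤ PySem.Str.len (PySem.Str.lower skill) := by
      rw [PySem.Str.len_eq]; simp
    have h1 : (0:Int) ≤ max 0 (pos - 150) := le_max_left _ _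
    have h2 : max 0 (pos - 150) ≤ min (PySem.Str.len jd_text) (pos + PySem.Str.len (PySem.Str.lower skill) + 150) := by
      rw [← hlen]; omega
    have h3 : min (PySem.Str.len jd_text) (pos + PySem.Str.len (PySem.Str.lower skill) + 150) ≤ ((PySem.Str.lower jd_text).toList.length : Int) := by
      rw [hlen]; exact min_le_left _ _
    rw [pvScanEqFlat (PySem.Str.lower jd_text) _ _ h1 h2 h3]
    exact pvTailEq seniority nice _ _ (pvStep1 _)
  · rw [if_neg hpos, if_neg hpos]
    exact pvTailEq seniority nice (-1) none (Or.inl ⟨rfl, rfl⟩)
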